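-- pv_equiv track=rewrite | github.com/br-data/wtwm-topic-modelling | src/recogniser/pattern_recogniser.py | longest_in_group
-- ===== SOURCE A (Python) =====
-- def longest_in_group(group: list[dict]) -> dict:
--     """Return longest in substring match group
--
--     :param group: group of substring matches
--     """
--     longest = group[0]
--     longest_end = longest["start"] + longest["offset"]
--     for e in group[1:]:
--         curr_end = e["start"] + e["offset"]
--         if curr_end >= longest_end:
--             longest = e
--
--     return longest
-- ===== SOURCE B (Python) =====
-- def longest_in_group(group: list[dict]) -> dict:
--     """Return longest in substring match group
--
--     :param group: group of substring matches
--     """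
--     threshold = group[0]["start"] + group[0]["offset"]
--     for e in reversed(group):
--         if e["start"] + e["offset"] >= threshold:
--             return e
-- ===== Notes on version B (the rewrite author's own statement) =====
-- stated objective: alternative
-- what changed: A folds forward keeping the last element whose end meets the fixed first-element threshold; B computes the threshold once and returns the first qualifying element of a reverse scan, exiting early.
import Mathlib
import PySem

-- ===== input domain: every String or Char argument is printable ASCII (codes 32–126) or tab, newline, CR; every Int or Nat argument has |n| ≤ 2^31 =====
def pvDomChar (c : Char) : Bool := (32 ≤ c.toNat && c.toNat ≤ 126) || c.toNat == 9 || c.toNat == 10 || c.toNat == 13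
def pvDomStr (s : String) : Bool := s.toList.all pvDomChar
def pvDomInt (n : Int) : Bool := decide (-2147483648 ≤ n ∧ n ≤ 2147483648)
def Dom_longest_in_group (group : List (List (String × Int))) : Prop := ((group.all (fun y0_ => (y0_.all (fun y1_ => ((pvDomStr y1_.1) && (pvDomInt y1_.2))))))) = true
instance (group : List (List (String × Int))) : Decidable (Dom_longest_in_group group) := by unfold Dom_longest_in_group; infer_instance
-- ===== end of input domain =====

-- B replaces A's forward fold (keep the last element whose end meets the fixed first-element
-- threshold) by a reverse scan returning the first qualifying element; alternative decomposition, same cost.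


-- dict lookup e[k]: first match in the association list (exact for Python dicts, whose keys are unique);
-- the default 0 is never reached under Pre_, which requires both keys to be present.
def pvEnd (e : List (String × Int)) : Int :=
  (e.lookup "start").getD 0 + (e.lookup "offset").getD 0

-- ===== PORT A =====
def longest_in_group (group : List (List (String × Int))) : List (String × Int) :=
  let longest := group.headD []
  let longest_end := pvEnd longest
  (group.drop 1).foldl (fun longest e => if pvEnd e ≥ longest_end then e else longest) longest

-- ===== PORT B =====
def longest_in_group_alt (group : List (List (String × Int))) : List (String × Int) :=
  let threshold := pvEnd (group.headD [])
  match group.reverse.find? (fun e => decide (pvEnd e ≥ threshold)) with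
  | some e => e
  | none => []

-- ===== PRECONDITION & SPEC =====
-- A raises IndexError on an empty group and KeyError when an element lacks "start" or "offset"; Pre_ excludes exactly those.
def Pre_longest_in_group (group : List (List (String × Int))) : Prop :=
  group ≠ [] ∧ ∀ e ∈ group, (e.lookup "start").isSome ∧ (e.lookup "offset").isSome
instance (group : List (List (String × Int))) : Decidable (Pre_longest_in_group group) := by unfold Pre_longest_in_group; infer_instance
def pvWitness_longest_in_group : (List (List (String × Int))) :=
  [[("start", 1), ("offset", 2)], [("start", 0), ("offset", 5)]]
def Spec_longest_in_group (group : List (List (String × Int))) (out : List (String × Int)) : Prop := out = longest_in_group_alt group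
instance (group : List (List (String × Int))) (out : List (String × Int)) : Decidable (Spec_longest_in_group group out) := by unfold Spec_longest_in_group; infer_instance

-- ===== CLAIM (what is proved, stated in full; the proofs are below) =====
def Claim_equal_longest_in_group : Prop := ∀ (group : List (List (String × Int))), Dom_longest_in_group group → Pre_longest_in_group group → Spec_longest_in_group group (longest_in_group group)

-- ===== LEMMAS AND PROOFS =====
theorem foldl_keep_last (p : List (String × Int) → Bool) :
    ∀ (l : List (List (String × Int))) (d : List (String × Int)),
      l.foldl (fun acc e => if p e then e else acc) d = (l.reverse.find? p).getD d := by
  intro l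
  induction l with
  | nil => intro d; simp
  | cons e l ih =>
    intro d
    simp only [List.foldl_cons, List.reverse_cons, List.find?_append, ih]
    cases h : l.reverse.find? p with
    | some x => simp
    | none =>
      by_cases hp : p e = true <;> simp [List.find?, hp]

-- ===== VERDICT (by name: the statement is the Claim_ definition above) =====
theorem longest_in_group_spec : Claim_equal_longest_in_group := by
  intro group _ _
  unfold Spec_longest_in_group longest_in_group longest_in_group_alt
  cases group with
  | nil => rfl
  | cons h t =>
    simp only [List.headD_cons, List.drop_succ_cons, List.drop_zero, List.reverse_cons,
      List.find?_append]
    have key := foldl_keep_last (fun e => decide (pvEnd e ≥ pvEnd h)) t h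
    simp only [decide_eq_true_eq] at key
    refine key.trans ?_
    cases hf : List.find? (fun e => decide (pvEnd e ≥ pvEnd h)) t.reverse <;>
      simp_all [Option.or]
    rw [List.find?_eq_none.mpr
      (fun x hx => by simpa using not_le.mpr (hf x (List.mem_reverse.mp hx)))]
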